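-- pv_equiv track=rewrite | github.com/Vinisme404/sboxdpa | sboxdpa-student.py | HWfun
-- ===== SOURCE A (Python) =====
-- def to_bin(value, num):  # 十进制数据，二进制位宽
--     bin_chars = ""
--     temp = value
--     for i in range(num):
--         bin_char = bin(temp % 2)[-1]
--         temp = temp // 2
--         bin_chars = bin_char + bin_chars
--     return bin_chars.upper()
--
-- def HWfun(num):
--     # 统计输入num的汉明重量并返回
--     hmweight = []
--     for x in num:
--         count = 0
--         x = to_bin(x, 6)
--         for y in x:
--             if y == '1':
--                 count += 1
--         hmweight.append(count)
--     return hmweight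
-- ===== SOURCE B (Python) =====
-- def popcount(n):
--     c = 0
--     while n:
--         n &= n - 1
--         c += 1
--     return c
--
-- def HWfun(num):
--     return [popcount(x % 64) for x in num]
-- ===== Notes on version B (the rewrite author's own statement) =====
-- stated objective: faster
-- what changed: Replaces the build-a-6-char-binary-string-then-scan-characters inner pass with a direct mask (x % 64) and Kernighan's bit-clearing loop (n &= n-1) that iterates only over set bits, emitted via a list comprehension.
import Mathlib
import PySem

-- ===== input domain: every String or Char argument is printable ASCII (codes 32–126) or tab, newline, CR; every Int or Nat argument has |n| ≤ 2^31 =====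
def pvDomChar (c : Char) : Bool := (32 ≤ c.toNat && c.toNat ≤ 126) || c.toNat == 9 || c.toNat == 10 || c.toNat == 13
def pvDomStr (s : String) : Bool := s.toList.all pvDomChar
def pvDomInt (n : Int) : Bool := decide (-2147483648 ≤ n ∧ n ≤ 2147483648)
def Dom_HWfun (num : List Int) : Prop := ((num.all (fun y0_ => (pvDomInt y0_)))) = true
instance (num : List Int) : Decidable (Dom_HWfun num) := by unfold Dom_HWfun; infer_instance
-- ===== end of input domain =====

-- B replaces A's build-a-binary-string-then-scan-characters inner pass with a mask (x % 64)
-- plus Kernighan's bit-clearing loop; equivalence of the return values is proved on all inputs.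

-- ===== PORT A =====
-- to_bin(value, num): builds the num-bit binary string (as a list of chars, PySem style).
-- bin(temp % 2)[-1]: temp % 2 is 0 or 1, so the last char of bin(...) is exactly '1' or '0';
-- the port writes that character directly (exact on all ints). .upper() is ported faithfully.
def pvToBin (value : Int) (num : Int) : List Char :=
  let p := (PySem.List.pyRange 0 num 1).foldl
    (fun (st : List Char × Int) _ =>
      let binChar : Char := if PySem.Int.mod st.2 2 == 1 then '1' else '0'
      (binChar :: st.1, PySem.Int.floordiv st.2 2))
    (([] : List Char), value)
  PySem.Chars.upper p.1

def HWfun (num : List Int) : List Int :=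
  num.foldl
    (fun (hmweight : List Int) x =>
      let s := pvToBin x 6
      let count := s.foldl (fun (c : Int) y => if y == '1' then c + 1 else c) 0
      hmweight ++ [count])
    []

-- ===== PORT B =====
-- popcount(n): Kernighan's loop 'while n: n &= n - 1; c += 1'.  n = x % 64 is nonnegative,
-- so the loop state is carried as a Nat (n &&& (n-1) is Python's n & (n-1) on nonnegative ints).
def pvPopcount (n : Nat) (c : Int) : Int :=
  if h : n = 0 then c else pvPopcount (n &&& (n - 1)) (c + 1)
termination_by n
decreasing_by
  have := Nat.and_le_right (n := n) (m := n - 1)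
  omega

def HWfun_alt (num : List Int) : List Int :=
  num.map (fun x => pvPopcount (PySem.Int.mod x 64).toNat 0)

-- ===== PRECONDITION & SPEC =====
def Spec_HWfun (num : List Int) (out : List Int) : Prop := out = HWfun_alt num
instance (num : List Int) (out : List Int) : Decidable (Spec_HWfun num out) := by unfold Spec_HWfun; infer_instance

-- ===== CLAIM (what is proved, stated in full; the proofs are below) =====
def Claim_equal_HWfun : Prop := ∀ (num : List Int), Dom_HWfun num → Spec_HWfun num (HWfun num)

-- ===== LEMMAS AND PROOFS =====

-- A's per-element computation.
def pvCntA (x : Int) : Int :=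
  (pvToBin x 6).foldl (fun (c : Int) y => if y == '1' then c + 1 else c) 0

theorem HWfun_eq_map (num : List Int) : HWfun num = num.map pvCntA := by
  simpa [HWfun, pvCntA] using PySem.List.foldl_append_singleton_eq_map pvCntA num []

-- A's count depends only on x mod 64: the 6 extracted bits of x and of x.emod 64 coincide.
theorem pvCntA_mod (x : Int) : pvCntA x = pvCntA (x.emod 64) := by
  have h64 : (0:Int) < 64 := by norm_num
  -- shift facts: (a % 2^(k+1)) / 2 = (a / 2) % 2^k  and  a % 2^k % 2 = a % 2
  have l32 : ∀ a : ℤ, (a % 64) / 2 = (a / 2) % 32 := fun a => by omega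
  have l16 : ∀ a : ℤ, (a % 32) / 2 = (a / 2) % 16 := fun a => by omega
  have l8  : ∀ a : ℤ, (a % 16) / 2 = (a / 2) % 8  := fun a => by omega
  have l4  : ∀ a : ℤ, (a % 8)  / 2 = (a / 2) % 4  := fun a => by omega
  have l2  : ∀ a : ℤ, (a % 4)  / 2 = (a / 2) % 2  := fun a => by omega
  have m64 : ∀ a : ℤ, a % 64 % 2 = a % 2 := fun a => Int.emod_emod_of_dvd a (by norm_num)
  have m32 : ∀ a : ℤ, a % 32 % 2 = a % 2 := fun a => Int.emod_emod_of_dvd a (by norm_num)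
  have m16 : ∀ a : ℤ, a % 16 % 2 = a % 2 := fun a => Int.emod_emod_of_dvd a (by norm_num)
  have m8  : ∀ a : ℤ, a % 8 % 2  = a % 2 := fun a => Int.emod_emod_of_dvd a (by norm_num)
  have m4  : ∀ a : ℤ, a % 4 % 2  = a % 2 := fun a => Int.emod_emod_of_dvd a (by norm_num)
  have m2  : ∀ a : ℤ, a % 2 % 2  = a % 2 := fun a => Int.emod_emod_of_dvd a (by norm_num)
  have hp : (0:Int) < 2 := by norm_num
  simp only [pvCntA, pvToBin, show PySem.List.pyRange 0 6 1 = [0,1,2,3,4,5] from by decide,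
    List.foldl, PySem.Int.mod_eq_emod_of_pos hp, PySem.Int.floordiv_eq_ediv_of_pos hp]
  rw [show x.emod 64 = x % 64 from rfl]
  simp only [l32, l16, l8, l4, l2, m64, m32, m16, m8, m4, m2]

-- On the 64 residues the two per-element computations agree (finite check).
theorem pvCntA_eq_pop (r : Nat) (hr : r < 64) : pvCntA (r : Int) = pvPopcount r 0 := by
  interval_cases r <;> simp [pvPopcount] <;> decide

theorem pv_elem (x : Int) : pvCntA x = pvPopcount (PySem.Int.mod x 64).toNat 0 := by
  have hm : PySem.Int.mod x 64 = x.emod 64 := PySem.Int.mod_eq_emod_of_pos (by norm_num)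
  have h0 : (0:Int) ≤ x.emod 64 := Int.emod_nonneg x (by norm_num)
  have h64 : x.emod 64 < 64 := Int.emod_lt_of_pos x (by norm_num)
  have hcast : ((x.emod 64).toNat : Int) = x.emod 64 := Int.toNat_of_nonneg h0
  have hlt : (x.emod 64).toNat < 64 := by omega
  calc pvCntA x = pvCntA (x.emod 64) := pvCntA_mod x
    _ = pvCntA ((x.emod 64).toNat : Int) := by rw [hcast]
    _ = pvPopcount (x.emod 64).toNat 0 := pvCntA_eq_pop _ hlt
    _ = pvPopcount (PySem.Int.mod x 64).toNat 0 := by rw [hm]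

-- ===== VERDICT (by name: the statement is the Claim_ definition above) =====
theorem HWfun_spec : Claim_equal_HWfun := by
  intro num _
  unfold Spec_HWfun HWfun_alt
  rw [HWfun_eq_map]
  exact List.map_congr_left (fun x _ => pv_elem x)
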